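-- pv_equiv track=rewrite | github.com/aliyuuuuster/diplom | ML/sketch_segmantator.py | get_rectang
-- ===== SOURCE A (Python) =====
-- def get_rectang(mask):
--     min_i, min_j, max_i, max_j = None, None, None, None
--     for row_idx, mask_row in enumerate(mask):
--         for col_idx, mask_element in enumerate(mask_row):
--             if min_i is None and mask_element:
--                 min_i = row_idx
--             if mask_element and (min_j is None or min_j > col_idx):
--                 min_j = col_idx
--             if mask_element:
--                 max_i = row_idx
--             if mask_element and (max_j is None or max_j < col_idx):
--                 max_j = col_idx
--     return min_i, min_j, max_i, max_j
-- ===== SOURCE B (Python) =====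
-- def get_rectang(mask):
--     coords = [(i, j) for i, row in enumerate(mask) for j, el in enumerate(row) if el]
--     if not coords:
--         return None, None, None, None
--     return (coords[0][0],
--             min(j for _, j in coords),
--             coords[-1][0],
--             max(j for _, j in coords))
-- ===== Notes on version B (the rewrite author's own statement) =====
-- stated objective: simpler
-- what changed: B collects all truthy coordinates in one comprehension and reduces that table (first/last row, min/max column) instead of maintaining four running extremes with guarded updates inside the nested loop.
import Mathlib
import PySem

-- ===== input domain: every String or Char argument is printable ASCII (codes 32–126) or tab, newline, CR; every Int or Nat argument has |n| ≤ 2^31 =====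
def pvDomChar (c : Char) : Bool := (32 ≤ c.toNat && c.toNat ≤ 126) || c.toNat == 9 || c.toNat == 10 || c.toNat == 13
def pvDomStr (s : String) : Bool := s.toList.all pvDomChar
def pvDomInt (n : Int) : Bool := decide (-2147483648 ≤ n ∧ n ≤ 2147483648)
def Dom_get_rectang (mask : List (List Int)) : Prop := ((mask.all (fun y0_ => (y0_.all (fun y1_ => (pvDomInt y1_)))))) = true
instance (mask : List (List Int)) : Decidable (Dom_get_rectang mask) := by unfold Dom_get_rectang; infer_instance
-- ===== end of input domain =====

-- B collects all truthy coordinates once and reduces that table (first/last row, min/max column)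
-- instead of A's four guarded running extremes in the nested loop; objective: simpler.

-- ===== PORT A =====
-- the body of A's inner loop: the four guarded updates, in A's order (r = row_idx, cp = (col_idx, element))
def pvStepA (r : Int) (s : Option Int × Option Int × Option Int × Option Int) (cp : Int × Int) :
    Option Int × Option Int × Option Int × Option Int :=
  let mi := if s.1 = none ∧ cp.2 ≠ 0 then some r else s.1
  let mj := if cp.2 ≠ 0 ∧ (match s.2.1 with | none => true | some m => decide (cp.1 < m)) = true
            then some cp.1 else s.2.1
  let Mi := if cp.2 ≠ 0 then some r else s.2.2.1
  let Mj := if cp.2 ≠ 0 ∧ (match s.2.2.2 with | none => true | some m => decide (m < cp.1)) = true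
            then some cp.1 else s.2.2.2
  (mi, mj, Mi, Mj)

def get_rectang (mask : List (List Int)) : Option Int × Option Int × Option Int × Option Int :=
  (PySem.List.enumerate mask 0).foldl
    (fun s rp => (PySem.List.enumerate rp.2 0).foldl (pvStepA rp.1) s)
    (none, none, none, none)

-- ===== PORT B =====
-- coords = [(i, j) for i, row in enumerate(mask) for j, el in enumerate(row) if el]
def pvCoords (mask : List (List Int)) : List (Int × Int) :=
  (PySem.List.enumerate mask 0).flatMap (fun rp =>
    (PySem.List.enumerate rp.2 0).filterMap (fun cp =>
      if cp.2 ≠ 0 then some (rp.1, cp.1) else none))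

def get_rectang_alt (mask : List (List Int)) : Option Int × Option Int × Option Int × Option Int :=
  match pvCoords mask with
  | [] => (none, none, none, none)
  | c :: rest =>
      (some c.1,
       ((c :: rest).map Prod.snd).min?,
       some (((c :: rest).getLast (List.cons_ne_nil c rest)).1),
       ((c :: rest).map Prod.snd).max?)

-- ===== PRECONDITION & SPEC =====
def Spec_get_rectang (mask : List (List Int)) (out : Option Int × Option Int × Option Int × Option Int) : Prop := out = get_rectang_alt mask
instance (mask : List (List Int)) (out : Option Int × Option Int × Option Int × Option Int) : Decidable (Spec_get_rectang mask out) := by unfold Spec_get_rectang; infer_instance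

-- ===== CLAIM (what is proved, stated in full; the proofs are below) =====
def Claim_equal_get_rectang : Prop := ∀ (mask : List (List Int)), Dom_get_rectang mask → Spec_get_rectang mask (get_rectang mask)

-- ===== LEMMAS AND PROOFS =====

-- the update A performs on a truthy element at coordinate (i, j)
def pvUpd (s : Option Int × Option Int × Option Int × Option Int) (p : Int × Int) :
    Option Int × Option Int × Option Int × Option Int :=
  ((if s.1 = none then some p.1 else s.1),
   some (match s.2.1 with | none => p.2 | some m => min m p.2),
   some p.1,
   some (match s.2.2.2 with | none => p.2 | some m => max m p.2))

theorem pvStepA_eq (r : Int) (s : Option Int × Option Int × Option Int × Option Int) (cp : Int × Int) :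
    pvStepA r s cp = if cp.2 = 0 then s else pvUpd s (r, cp.1) := by
  obtain ⟨mi, mj, Mi, Mj⟩ := s
  by_cases h : cp.2 = 0
  · simp [pvStepA, h]
  · cases mj <;> cases Mj <;>
      simp [pvStepA, pvUpd, h, min_def, max_def] <;> split_ifs <;> simp_all <;> omega

theorem foldl_stepA_filterMap (r : Int) (row : List (Int × Int))
    (s : Option Int × Option Int × Option Int × Option Int) :
    row.foldl (pvStepA r) s =
      (row.filterMap (fun cp => if cp.2 ≠ 0 then some (r, cp.1) else none)).foldl pvUpd s := by
  induction row generalizing s with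
  | nil => rfl
  | cons cp rest ih =>
    by_cases h : cp.2 = 0 <;>
      simp [h, pvStepA_eq, ih]

theorem get_rectang_eq_foldl_upd (mask : List (List Int)) :
    get_rectang mask = (pvCoords mask).foldl pvUpd (none, none, none, none) := by
  unfold get_rectang pvCoords
  rw [List.foldl_flatMap]
  simp only [foldl_stepA_filterMap]

-- once every component is `some`, the fold keeps the first row, last row, min and max column
theorem foldl_upd_some (l : List (Int × Int)) (a b c d : Int) :
    l.foldl pvUpd (some a, some b, some c, some d) =
      (some a, some (l.foldl (fun m p => min m p.2) b),
       some ((l.map Prod.fst).getLastD c),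
       some (l.foldl (fun m p => max m p.2) d)) := by
  induction l generalizing b c d with
  | nil => rfl
  | cons p rest ih =>
    simp only [List.foldl_cons, List.map_cons, List.getLastD_cons]
    rw [show pvUpd (some a, some b, some c, some d) p
          = (some a, some (min b p.2), some p.1, some (max d p.2)) by simp [pvUpd]]
    exact ih _ _ _

theorem min?_eq_foldl (c : Int × Int) (rest : List (Int × Int)) :
    ((c :: rest).map Prod.snd).min? = some (rest.foldl (fun m p => min m p.2) c.2) := by
  rw [List.map_cons, List.min?_cons', List.foldl_map]

theorem max?_eq_foldl (c : Int × Int) (rest : List (Int × Int)) :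
    ((c :: rest).map Prod.snd).max? = some (rest.foldl (fun m p => max m p.2) c.2) := by
  rw [List.map_cons, List.max?_cons', List.foldl_map]

theorem getLast_eq_getLastD (c : Int × Int) (rest : List (Int × Int)) :
    ((c :: rest).getLast (List.cons_ne_nil c rest)).1 = (rest.map Prod.fst).getLastD c.1 := by
  induction rest generalizing c with
  | nil => rfl
  | cons p rest ih =>
    rw [List.map_cons, List.getLastD_cons, List.getLast_cons_cons]
    exact ih p

-- ===== VERDICT (by name: the statement is the Claim_ definition above) =====
theorem get_rectang_spec : Claim_equal_get_rectang := by
  intro mask _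
  show get_rectang mask = get_rectang_alt mask
  rw [get_rectang_eq_foldl_upd]
  unfold get_rectang_alt
  cases h : pvCoords mask with
  | nil => rfl
  | cons c rest =>
    dsimp only
    rw [min?_eq_foldl, max?_eq_foldl, getLast_eq_getLastD]
    simp only [List.foldl_cons]
    have : pvUpd (none, none, none, none) c = (some c.1, some c.2, some c.1, some c.2) := rfl
    rw [this, foldl_upd_some]
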